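-- pv_equiv track=rewrite | github.com/lifee77/Voyagent | Voyagent/tools/deepl.py | _parse_translate_query
-- ===== SOURCE A (Python) =====
-- def _parse_translate_query(query: str) -> dict:
--     """Parse the translation query to extract text and target language."""
--     params = {"text": "", "target_language": ""}
--
--     for part in query.split(","):
--         part = part.strip()
--
--         if part.lower().startswith("text:"):
--             params["text"] = part[5:].strip()
--         elif part.lower().startswith("target_language:"):
--             params["target_language"] = part[16:].strip()
--
--     return params
-- ===== SOURCE B (Python) =====
-- def _parse_translate_query(query: str) -> dict:
--     parsed = {}
--     for part in query.split(","):
--         key, sep, value = part.strip().partition(":")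
--         if sep:
--             parsed[key.lower()] = value.strip()
--     return {"text": parsed.get("text", ""),
--             "target_language": parsed.get("target_language", "")}
-- ===== Notes on version B (the rewrite author's own statement) =====
-- stated objective: simpler
-- what changed: Replaces the inline prefix-test branching (lower().startswith + fixed-offset slicing) by a generic key:value table built with str.partition, from which the two wanted fields are selected at the end.
import Mathlib
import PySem

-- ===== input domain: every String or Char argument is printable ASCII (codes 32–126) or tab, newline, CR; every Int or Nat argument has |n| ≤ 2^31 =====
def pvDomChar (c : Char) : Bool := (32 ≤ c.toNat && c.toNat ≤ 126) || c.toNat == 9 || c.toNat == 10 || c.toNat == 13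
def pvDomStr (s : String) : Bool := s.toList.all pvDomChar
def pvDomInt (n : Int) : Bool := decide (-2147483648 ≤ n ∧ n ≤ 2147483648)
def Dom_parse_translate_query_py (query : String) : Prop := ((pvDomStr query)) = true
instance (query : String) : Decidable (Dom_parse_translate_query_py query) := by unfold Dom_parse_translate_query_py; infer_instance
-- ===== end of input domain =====

-- B builds a generic key:value table with str.partition(":") and selects the two fields at the end,
-- instead of A's inline lower().startswith prefix tests with fixed-offset slicing (objective: simpler).

-- ===== PORT A =====
-- loop body of A's for-loop: part = part.strip() (inlined), two lowercased prefix tests, fixed-offset slices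
def pvStepA (d : PySem.Dict String String) (part : String) : PySem.Dict String String :=
  -- part = part0.strip(), inlined
  if PySem.Str.startswith (PySem.Str.lower (PySem.Str.strip part)) "text:" then
    d.insert "text" (PySem.Str.strip (PySem.Str.slice (PySem.Str.strip part) (some 5) none))
  else if PySem.Str.startswith (PySem.Str.lower (PySem.Str.strip part)) "target_language:" then
    d.insert "target_language" (PySem.Str.strip (PySem.Str.slice (PySem.Str.strip part) (some 16) none))
  else d

def parse_translate_query_py (query : String) : List (String × String) :=
  (((PySem.Str.split? query ",").getD []).foldl pvStepA
    ((PySem.Dict.empty.insert "text" "").insert "target_language" "" : PySem.Dict String String)).items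

-- ===== PORT B =====
-- hand port of str.partition(":") : (before, sep, after); sep = [] when ':' is absent (exact)
def pvPartitionColon : List Char → List Char × List Char × List Char
  | [] => ([], [], [])
  | c :: cs =>
    if c = ':' then ([], [':'], cs)
    else
      let r := pvPartitionColon cs
      (c :: r.1, r.2.1, r.2.2)

-- loop body of B's for-loop: key, sep, value = part.strip().partition(":") (the three projections), last-wins insert
def pvStepB (d : PySem.Dict String String) (part : String) : PySem.Dict String String :=
  -- key, sep, value = part.strip().partition(":"), inlined as the three projections
  if (pvPartitionColon (PySem.Str.strip part).toList).2.1 ≠ [] then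
    d.insert (String.ofList (PySem.Chars.lower (pvPartitionColon (PySem.Str.strip part).toList).1))
             (String.ofList (PySem.Chars.strip (pvPartitionColon (PySem.Str.strip part).toList).2.2))
  else d


def parse_translate_query_py_alt (query : String) : List (String × String) :=
  let parsed := ((PySem.Str.split? query ",").getD []).foldl pvStepB
    (PySem.Dict.empty : PySem.Dict String String)
  [("text", parsed.getD "text" ""), ("target_language", parsed.getD "target_language" "")]

-- ===== PRECONDITION & SPEC =====
def Spec_parse_translate_query_py (query : String) (out : List (String × String)) : Prop := out = parse_translate_query_py_alt query
instance (query : String) (out : List (String × String)) : Decidable (Spec_parse_translate_query_py query out) := by unfold Spec_parse_translate_query_py; infer_instance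

-- ===== CLAIM (what is proved, stated in full; the proofs are below) =====
def Claim_equal_parse_translate_query_py : Prop := ∀ (query : String), Dom_parse_translate_query_py query → Spec_parse_translate_query_py query (parse_translate_query_py query)

-- ===== LEMMAS AND PROOFS =====

lemma pvLowerChar_colon (c : Char) : PySem.Chars.lowerChar c = ':' ↔ c = ':' := by
  unfold PySem.Chars.lowerChar PySem.Chars.isupper
  split_ifs with h
  · simp only [Bool.and_eq_true, decide_eq_true_eq] at h
    have h65 : 65 ≤ c.toNat := h.1
    have h90 : c.toNat ≤ 90 := h.2
    constructor
    · intro he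
      exfalso
      have := congrArg Char.toNat he
      rw [Char.toNat_ofNat, if_pos (Or.inl (by omega : c.toNat + 32 < 0xD800))] at this
      have h58 : (':' : Char).toNat = 58 := rfl
      omega
    · intro he; subst he; exact absurd h65 (by decide)
  · exact Iff.rfl


lemma pvPartition_sep (cs : List Char) :
    (pvPartitionColon cs).2.1 = [] ∨ (pvPartitionColon cs).2.1 = [':'] := by
  induction cs with
  | nil => left; rfl
  | cons c cs ih =>
    by_cases hc : c = ':'
    · right; simp [pvPartitionColon, hc]
    · simpa [pvPartitionColon, hc] using ih


-- A's prefix test `part.lower().startswith(p + ":")` read through B's partition(":")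
lemma pvPartition_spec (p : List Char) (hp : (':' : Char) ∉ p) (cs : List Char) :
    (PySem.Chars.startswith (PySem.Chars.lower cs) (p ++ [':']) = true ↔
      ((pvPartitionColon cs).2.1 = [':'] ∧ PySem.Chars.lower (pvPartitionColon cs).1 = p)) ∧
    (PySem.Chars.startswith (PySem.Chars.lower cs) (p ++ [':']) = true →
      (pvPartitionColon cs).2.2 = List.drop (p.length + 1) cs) := by
  induction cs generalizing p with
  | nil =>
    constructor
    · simp [PySem.Chars.startswith, PySem.Chars.lower, pvPartitionColon]
    · intro h
      rw [PySem.Chars.startswith_iff] at h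
      simp [PySem.Chars.lower] at h
  | cons c cs ih =>
    have hlower : PySem.Chars.lower (c :: cs) = PySem.Chars.lowerChar c :: PySem.Chars.lower cs := rfl
    by_cases hc : c = ':'
    · subst hc
      have hl : PySem.Chars.lowerChar ':' = ':' := rfl
      cases p with
      | nil =>
        constructor
        · simp [PySem.Chars.startswith_iff, hl, pvPartitionColon, PySem.Chars.lower,
            List.cons_prefix_cons]
        · intro _; simp [pvPartitionColon]
      | cons q p' =>
        have hq : q ≠ ':' := fun h => hp (h ▸ List.mem_cons_self)
        constructor
        · simp [PySem.Chars.startswith_iff, hl, pvPartitionColon, PySem.Chars.lower,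
            List.cons_prefix_cons]
          intro h; exact absurd h hq
        · intro h
          exfalso
          rw [PySem.Chars.startswith_iff, hlower, hl] at h
          simp only [List.cons_append] at h
          rcases List.cons_prefix_cons.mp h with ⟨h1, _⟩
          exact hq h1
    · have hlc : PySem.Chars.lowerChar c ≠ ':' := fun h => hc ((pvLowerChar_colon c).mp h)
      have hpart : pvPartitionColon (c :: cs) =
          (c :: (pvPartitionColon cs).1, (pvPartitionColon cs).2.1, (pvPartitionColon cs).2.2) := by
        simp [pvPartitionColon, hc]
      cases p with
      | nil =>
        constructor
        · rw [PySem.Chars.startswith_iff, hlower, hpart]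
          simp [List.cons_prefix_cons, PySem.Chars.lower]
          intro h; exact absurd h.symm hlc
        · intro h
          exfalso
          rw [PySem.Chars.startswith_iff, hlower] at h
          simp only [List.nil_append] at h
          rcases List.cons_prefix_cons.mp h with ⟨h1, _⟩
          exact hlc h1.symm
      | cons q p' =>
        have hp' : (':' : Char) ∉ p' := fun h => hp (List.mem_cons_of_mem _ h)
        obtain ⟨ih1, ih2⟩ := ih p' hp'
        constructor
        · rw [PySem.Chars.startswith_iff, hlower, hpart]
          simp only [List.cons_append, List.cons_prefix_cons]
          constructor
          · rintro ⟨h1, h2⟩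
            have := ih1.mp (by rw [PySem.Chars.startswith_iff]; exact h2)
            exact ⟨this.1, by simp [PySem.Chars.lower] at this ⊢; exact ⟨h1.symm, this.2⟩⟩
          · rintro ⟨h1, h2⟩
            have h2' : PySem.Chars.lowerChar c :: PySem.Chars.lower (pvPartitionColon cs).1 = q :: p' := h2
            injection h2' with ha hb
            refine ⟨ha.symm, ?_⟩
            rw [← PySem.Chars.startswith_iff]
            exact ih1.mpr ⟨h1, hb⟩
        · intro h
          rw [PySem.Chars.startswith_iff, hlower] at h
          simp only [List.cons_append, List.cons_prefix_cons] at h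
          rw [hpart]
          simp only [List.length_cons, List.drop_succ_cons]
          have := ih2 (by rw [PySem.Chars.startswith_iff]; exact h.2)
          simpa using this

lemma pvInsert_text (x y v : String) :
    (PySem.Dict.mk [("text", x), ("target_language", y)] : PySem.Dict String String).insert "text" v
      = PySem.Dict.mk [("text", v), ("target_language", y)] := by
  simp [PySem.Dict.insert, PySem.Dict.contains]

lemma pvInsert_tl (x y v : String) :
    (PySem.Dict.mk [("text", x), ("target_language", y)] : PySem.Dict String String).insert "target_language" v
      = PySem.Dict.mk [("text", x), ("target_language", v)] := by
  simp [PySem.Dict.insert, PySem.Dict.contains]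


lemma pvStep_pres (part : String) (d : PySem.Dict String String) :
    pvStepA (PySem.Dict.mk [("text", d.getD "text" ""), ("target_language", d.getD "target_language" "")]) part
      = PySem.Dict.mk [("text", (pvStepB d part).getD "text" ""),
                       ("target_language", (pvStepB d part).getD "target_language" "")] := by
  unfold pvStepA pvStepB
  have hA1 : PySem.Str.startswith (PySem.Str.lower (PySem.Str.strip part)) "text:"
      = PySem.Chars.startswith (PySem.Chars.lower (PySem.Str.strip part).toList) (['t','e','x','t'] ++ [':']) := by
    simp
  have hA2 : PySem.Str.startswith (PySem.Str.lower (PySem.Str.strip part)) "target_language:"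
      = PySem.Chars.startswith (PySem.Chars.lower (PySem.Str.strip part).toList)
          (['t','a','r','g','e','t','_','l','a','n','g','u','a','g','e'] ++ [':']) := by
    simp
  obtain ⟨ht1, ht2⟩ := pvPartition_spec ['t','e','x','t'] (by decide) (PySem.Str.strip part).toList
  obtain ⟨hl1, hl2⟩ := pvPartition_spec ['t','a','r','g','e','t','_','l','a','n','g','u','a','g','e'] (by decide) (PySem.Str.strip part).toList
  by_cases h1 : PySem.Str.startswith (PySem.Str.lower (PySem.Str.strip part)) "text:" = true
  · have h1' := hA1 ▸ h1
    obtain ⟨hsep, hkey⟩ := ht1.mp h1'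
    have hv := ht2 h1'
    rw [if_pos h1, hsep, hkey]
    have hkeystr : String.ofList ['t','e','x','t'] = "text" := by decide
    rw [hkeystr]
    have hval : PySem.Str.strip (PySem.Str.slice (PySem.Str.strip part) (some 5) none)
        = String.ofList (PySem.Chars.strip (pvPartitionColon (PySem.Str.strip part).toList).2.2) := by
      apply String.toList_inj.mp
      rw [String.toList_ofList, hv]
      simp [PySem.Str.toList_strip, PySem.Str.toList_slice, PySem.Chars.slice_eq_listSlice, PySem.List.slice_from]
    rw [hval]
    rw [if_pos (by simp)]
    rw [PySem.Dict.getD_insert_self, PySem.Dict.getD_insert_of_ne _ _ _ (by decide), pvInsert_text]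
  · by_cases h2 : PySem.Str.startswith (PySem.Str.lower (PySem.Str.strip part)) "target_language:" = true
    · have h2' := hA2 ▸ h2
      obtain ⟨hsep, hkey⟩ := hl1.mp h2'
      have hv := hl2 h2'
      rw [if_neg h1, if_pos h2, hsep, hkey]
      have hkeystr : String.ofList ['t','a','r','g','e','t','_','l','a','n','g','u','a','g','e'] = "target_language" := by decide
      rw [hkeystr]
      have hval : PySem.Str.strip (PySem.Str.slice (PySem.Str.strip part) (some 16) none)
          = String.ofList (PySem.Chars.strip (pvPartitionColon (PySem.Str.strip part).toList).2.2) := by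
        apply String.toList_inj.mp
        rw [String.toList_ofList, hv]
        simp [PySem.Str.toList_strip, PySem.Str.toList_slice, PySem.Chars.slice_eq_listSlice, PySem.List.slice_from]
      rw [hval]
      rw [if_pos (by simp)]
      rw [PySem.Dict.getD_insert_self, PySem.Dict.getD_insert_of_ne _ _ _ (by decide), pvInsert_tl]
    · rw [if_neg h1, if_neg h2]
      rcases pvPartition_sep (PySem.Str.strip part).toList with hsep | hsep
      · rw [if_neg (fun hne => hne hsep)]
      · have h1' : ¬ PySem.Chars.startswith (PySem.Chars.lower (PySem.Str.strip part).toList) (['t','e','x','t'] ++ [':']) = true := by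
          rw [← hA1]; exact h1
        have h2' : ¬ PySem.Chars.startswith (PySem.Chars.lower (PySem.Str.strip part).toList) (['t','a','r','g','e','t','_','l','a','n','g','u','a','g','e'] ++ [':']) = true := by
          rw [← hA2]; exact h2
        have hkt : String.ofList (PySem.Chars.lower (pvPartitionColon (PySem.Str.strip part).toList).1) ≠ "text" := by
          intro h
          exact h1' (ht1.mpr ⟨hsep, by rw [← String.toList_ofList (l := PySem.Chars.lower _), h]; rfl⟩)
        have hkl : String.ofList (PySem.Chars.lower (pvPartitionColon (PySem.Str.strip part).toList).1) ≠ "target_language" := by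
          intro h
          exact h2' (hl1.mpr ⟨hsep, by rw [← String.toList_ofList (l := PySem.Chars.lower _), h]; rfl⟩)
        rw [if_pos (by rw [hsep]; exact fun hcon => List.cons_ne_nil _ _ hcon)]
        rw [PySem.Dict.getD_insert_of_ne _ _ _ (Ne.symm hkt), PySem.Dict.getD_insert_of_ne _ _ _ (Ne.symm hkl)]

lemma pvFold_pres (parts : List String) (d : PySem.Dict String String) :
    parts.foldl pvStepA
        (PySem.Dict.mk [("text", d.getD "text" ""), ("target_language", d.getD "target_language" "")])
      = PySem.Dict.mk [("text", (parts.foldl pvStepB d).getD "text" ""),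
                       ("target_language", (parts.foldl pvStepB d).getD "target_language" "")] := by
  induction parts generalizing d with
  | nil => rfl
  | cons h t ih => rw [List.foldl_cons, List.foldl_cons, pvStep_pres, ih]

-- ===== VERDICT (by name: the statement is the Claim_ definition above) =====
theorem parse_translate_query_py_spec : Claim_equal_parse_translate_query_py := by
  intro query _
  unfold Spec_parse_translate_query_py parse_translate_query_py parse_translate_query_py_alt
  have h0 : ((PySem.Dict.empty.insert "text" "").insert "target_language" "" : PySem.Dict String String)
      = PySem.Dict.mk [("text", (PySem.Dict.empty : PySem.Dict String String).getD "text" ""),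
                       ("target_language", (PySem.Dict.empty : PySem.Dict String String).getD "target_language" "")] := by
    decide
  rw [h0]
  show (List.foldl pvStepA _ _).items = _
  rw [pvFold_pres]
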